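-- pv_equiv track=rewrite | github.com/KilaniMaryem/DNA-Sequences-Compression-and-Encoding | burros_wheeler.py | get_bwm_matrix_from_transform
-- ===== SOURCE A (Python) =====
-- def get_bwm_matrix_from_transform(bwt: str) :
--     """Burros-Wheeler Transform--> Matrix"""
--     bwm = []
--     for _ in range(0, len(bwt), 1):
--         bwm.append('')
--
--     for _ in range(0, len(bwt), 1):
--
--         for i in range(0, len(bwt), 1):
--             bwm[i] = bwt[i] + bwm[i]
--
--         yield [line for line in bwm]
--         bwm.sort()
--         yield [line for line in bwm]
-- ===== SOURCE B (Python) =====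
-- def get_bwm_matrix_from_transform(bwt: str):
--     """Burros-Wheeler Transform--> Matrix.
--
--     Argsort formulation: the sort permutation of every step is the SAME stable
--     argsort of bwt by character (the row tails are already sorted, so a stable
--     sort by the newly prepended first character sorts the whole matrix), so it
--     is computed once up front and each step's full sort becomes one gather."""
--     n = len(bwt)
--     order = sorted(range(n), key=lambda i: bwt[i])
--     rows = [''] * n
--     for _ in range(n):
--         pre = [bwt[i] + rows[i] for i in range(n)]
--         yield pre
--         rows = [pre[j] for j in order]
--         yield rows
-- ===== Notes on version B (the rewrite author's own statement) =====
-- stated objective: alternative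
-- what changed: The stable sort permutation of bwt by character is computed once up front (argsort of range(n)); every step's full comparison sort of the matrix is replaced by a single gather of the rows through that fixed permutation, correct because the row tails are already sorted from the previous step.
import Mathlib
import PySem

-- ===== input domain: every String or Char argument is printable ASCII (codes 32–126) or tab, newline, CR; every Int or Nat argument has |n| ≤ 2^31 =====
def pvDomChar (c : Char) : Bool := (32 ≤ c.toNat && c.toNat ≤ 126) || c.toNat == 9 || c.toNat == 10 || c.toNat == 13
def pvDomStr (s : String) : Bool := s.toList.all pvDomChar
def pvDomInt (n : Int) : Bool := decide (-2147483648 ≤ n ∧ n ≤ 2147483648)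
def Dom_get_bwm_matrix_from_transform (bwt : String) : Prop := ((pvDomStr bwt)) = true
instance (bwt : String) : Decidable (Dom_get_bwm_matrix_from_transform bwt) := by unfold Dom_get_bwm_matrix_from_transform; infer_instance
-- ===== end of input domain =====

-- B computes the stable argsort of bwt by character ONCE and replaces A's per-step full
-- comparison sort of the matrix by a single gather through that fixed permutation (the row
-- tails are already sorted after each step, so the stable sort permutation by the new first
-- character never changes); objective: alternative. Both Pythons are generators; the ports
-- collect the yielded lists in order. Rows are modelled as List Char (Python string
-- comparison = lexicographic by code point = the Lex order on List Char) and rendered to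
-- String only when yielded.

-- ===== PORT A =====
-- the inner loop 'for i in range(n): bwm[i] = bwt[i] + bwm[i]' writes each cell exactly
-- once in order = zip + map; 'bwm.sort()' = PySem.List.sorted with identity key.
def pvLoopA : Nat → List Char → List (List Char) → List (List String)
  | 0, _, _ => []
  | Nat.succ k, cs, bwm =>
    let bwm1 := (cs.zip bwm).map (fun p => p.1 :: p.2)
    let bwm2 := PySem.List.sorted bwm1 (fun x => x) false
    (bwm1.map (fun r => String.ofList r)) :: (bwm2.map (fun r => String.ofList r)) :: pvLoopA k cs bwm2

def get_bwm_matrix_from_transform (bwt : String) : List (List String) :=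
  pvLoopA bwt.toList.length bwt.toList (List.replicate bwt.toList.length [])

-- ===== PORT B =====
-- 'order = sorted(range(n), key=lambda i: bwt[i])' = stable argsort of the character list;
-- the loop keeps the pair (rows, collected output) as a foldl accumulator; 'bwt[i]' with
-- 0 ≤ i < n is cs.getD i ' '.
def get_bwm_matrix_from_transform_alt (bwt : String) : List (List String) :=
  let cs := bwt.toList
  let n := cs.length
  let order := PySem.List.sorted (List.range n) (fun i => cs.getD i ' ') false
  ((List.range n).foldl
    (fun (st : List (List Char) × List (List String)) _ =>
      let pre := (List.range n).map (fun i => cs.getD i ' ' :: st.1.getD i [])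
      let rows := order.map (fun j => pre.getD j [])
      (rows, st.2 ++ [pre.map (fun r => String.ofList r), rows.map (fun r => String.ofList r)]))
    (List.replicate n [], [])).2

-- ===== PRECONDITION & SPEC =====
def Spec_get_bwm_matrix_from_transform (bwt : String) (out : List (List String)) : Prop := out = get_bwm_matrix_from_transform_alt bwt
instance (bwt : String) (out : List (List String)) : Decidable (Spec_get_bwm_matrix_from_transform bwt out) := by unfold Spec_get_bwm_matrix_from_transform; infer_instance

-- ===== CLAIM (what is proved, stated in full; the proofs are below) =====
def Claim_equal_get_bwm_matrix_from_transform : Prop := ∀ (bwt : String), Dom_get_bwm_matrix_from_transform bwt → Spec_get_bwm_matrix_from_transform bwt (get_bwm_matrix_from_transform bwt)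

-- ===== LEMMAS AND PROOFS =====

-- PySem.List.sorted only reads the order through 'decide (key a < key b)', so propositionally
-- equal LT instances give the same result (bridges core List.instLT and Mathlib's Lex order)
theorem pvSortedCongrLT {α κ : Type} {i1 : LT κ} {d1 : @DecidableLT κ i1} {i2 : LT κ} {d2 : @DecidableLT κ i2}
    (h : ∀ a b : κ, (@LT.lt κ i1 a b ↔ @LT.lt κ i2 a b)) (xs : List α) (key : α → κ) :
    @PySem.List.sorted α κ i1 d1 xs key false = @PySem.List.sorted α κ i2 d2 xs key false := by
  rw [@PySem.List.sorted_eq_foldl_insertBy α κ i1 d1, @PySem.List.sorted_eq_foldl_insertBy α κ i2 d2]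
  have : (fun (a b : α) => @decide _ (d1 (key a) (key b))) = (fun a b => @decide _ (d2 (key a) (key b))) := by
    funext a b; exact decide_eq_decide.mpr (h _ _)
  rw [this]

-- STABILITY of the index sort: insertion keeps indices with equal keys in increasing order.
-- pvIdxRel i j: i must come before j in the stable argsort.
def pvIdxRel (key : Nat → Char) (i j : Nat) : Prop := key i < key j ∨ (key i = key j ∧ i < j)

theorem pvInsertPairwise (key : Nat → Char) (x : Nat) :
    ∀ (acc : List Nat), acc.Pairwise (pvIdxRel key) → (∀ y ∈ acc, y < x) →
      (PySem.List.insertBy (fun a b => decide (key a < key b)) x acc).Pairwise (pvIdxRel key) := by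
  intro acc
  induction acc with
  | nil => intro _ _; simp [PySem.List.insertBy, pvIdxRel]
  | cons y t ih =>
    intro hp hlt
    rw [List.pairwise_cons] at hp
    simp only [PySem.List.insertBy]
    split_ifs with hxy
    · rw [decide_eq_true_iff] at hxy
      refine List.pairwise_cons.mpr ⟨?_, List.pairwise_cons.mpr ⟨hp.1, hp.2⟩⟩
      intro z hz
      rcases List.mem_cons.mp hz with rfl | hz'
      · exact Or.inl hxy
      · have := hp.1 z hz'
        rcases this with h | h
        · exact Or.inl (lt_trans hxy h)
        · exact Or.inl (h.1 ▸ hxy)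
    · refine List.pairwise_cons.mpr ⟨?_, ih hp.2 (fun y hy => hlt y (List.mem_cons_of_mem _ hy))⟩
      intro z hz
      rcases (PySem.List.mem_insertBy _ _ _ _).mp hz with rfl | hz'
      · -- z = x: ¬ key x < key y, so key y < key x or key y = key x with y < x
        rw [decide_eq_true_iff] at hxy
        rcases lt_or_eq_of_le (le_of_not_gt hxy) with h | h
        · exact Or.inl h
        · exact Or.inr ⟨h, hlt y (List.mem_cons_self)⟩
      · exact hp.1 z hz'

theorem pvFoldStable (key : Nat → Char) :
    ∀ (xs acc : List Nat), acc.Pairwise (pvIdxRel key) → (∀ y ∈ acc, ∀ x ∈ xs, y < x) →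
      xs.Pairwise (· < ·) →
      (xs.foldl (fun acc x => PySem.List.insertBy (fun a b => decide (key a < key b)) x acc) acc).Pairwise (pvIdxRel key) := by
  intro xs
  induction xs with
  | nil => intro acc h _ _; simpa using h
  | cons x t ih =>
    intro acc hacc hlt hxs
    rw [List.foldl_cons]
    rw [List.pairwise_cons] at hxs
    refine ih _ (pvInsertPairwise key x acc hacc (fun y hy => hlt y hy x List.mem_cons_self)) ?_ hxs.2
    intro y hy x' hx'
    rcases (PySem.List.mem_insertBy _ _ _ _).mp hy with rfl | hy'
    · exact hxs.1 x' hx'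
    · exact hlt y hy' x' (List.mem_cons_of_mem _ hx')

-- the stable argsort of [0,…,n) by key is pairwise pvIdxRel
theorem pvArgsortStable (key : Nat → Char) (n : Nat) :
    (PySem.List.sorted (List.range n) key false).Pairwise (pvIdxRel key) := by
  rw [PySem.List.sorted_eq_foldl_insertBy]
  exact pvFoldStable key (List.range n) [] (by simp) (by simp) (List.pairwise_lt_range)

-- gathering a length-n list through the identity map over range n gives the list back
theorem pvMapRangeGetD (l : List (List Char)) :
    (List.range l.length).map (fun j => l.getD j []) = l := by
  apply List.ext_getElem
  · simp
  · intro i h1 h2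
    simp [List.getElem?_eq_getElem h2]

-- ONE STEP: the full sort of the prepended matrix is the gather through the fixed stable
-- argsort of cs (the tails are already sorted, so stable sorting by the new head sorts)
theorem pvStepEq (cs : List Char) (rows : List (List Char))
    (hlen : rows.length = cs.length) (hs : rows.Pairwise (· ≤ ·)) :
    PySem.List.sorted ((cs.zip rows).map (fun p => p.1 :: p.2)) (fun x => x) false
      = (PySem.List.sorted (List.range cs.length) (fun i => cs.getD i ' ') false).map
          (fun j => ((cs.zip rows).map (fun p => p.1 :: p.2)).getD j []) := by
  set key : Nat → Char := fun i => cs.getD i ' ' with hkey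
  set pre := (cs.zip rows).map (fun p => p.1 :: p.2) with hpre
  set order := PySem.List.sorted (List.range cs.length) key false with horder
  have hprelen : pre.length = cs.length := by
    rw [hpre, List.length_map, List.length_zip, hlen, Nat.min_self]
  have hperm : order.Perm (List.range cs.length) := PySem.List.sorted_perm _ _ _
  have hmem : ∀ i ∈ order, i < cs.length := by
    intro i hi
    have := hperm.mem_iff.mp hi
    simpa using this
  have hpreget : ∀ i (h : i < cs.length), pre.getD i [] = cs[i] :: rows[i]'(by omega) := by
    intro i h
    rw [List.getD_eq_getElem _ _ (by omega)]
    simp [hpre, List.getElem_zip]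
  -- the gathered list is a permutation of pre
  have hpermMap : (order.map (fun j => pre.getD j [])).Perm pre := by
    have h1 : (order.map (fun j => pre.getD j [])).Perm ((List.range cs.length).map (fun j => pre.getD j [])) :=
      hperm.map _
    rw [← hprelen] at h1
    rwa [pvMapRangeGetD pre] at h1
  -- the gathered list is ≤-sorted
  have hpw : (order.map (fun j => pre.getD j [])).Pairwise (· ≤ ·) := by
    rw [List.pairwise_map]
    refine List.Pairwise.imp_of_mem ?_ (pvArgsortStable key cs.length)
    intro i j hi hj hij
    have hi' := hmem i hi
    have hj' := hmem j hj
    rw [hpreget i hi', hpreget j hj']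
    have hki : key i = cs[i] := by simp [hkey, List.getD_eq_getElem?_getD, List.getElem?_eq_getElem hi']
    have hkj : key j = cs[j] := by simp [hkey, List.getD_eq_getElem?_getD, List.getElem?_eq_getElem hj']
    rcases hij with h | h
    · exact le_of_lt (List.Lex.rel (by rw [← hki, ← hkj]; exact h))
    · have hceq : cs[i] = cs[j] := by rw [← hki, ← hkj]; exact h.1
      rw [hceq]
      refine List.cons_le_cons _ ?_
      exact List.pairwise_iff_getElem.mp hs i j (by omega) (by omega) h.2
  -- name the sorted order (in the LinearOrder world), then bridge the LT instance
  have hcore : PySem.List.sorted pre (fun x => x) false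
      = @PySem.List.sorted _ _ Preorder.toLT LinearOrder.toDecidableLT pre (fun x => x) false :=
    pvSortedCongrLT (fun a b => List.lt_iff_lex_lt a b) pre _
  rw [hcore]
  exact PySem.List.sorted_id_eq_of_perm_of_pairwise _ _ hpermMap hpw

-- the range-indexed comprehension '[bwt[i] + rows[i] for i in range(n)]' is the zip form
theorem pvPreForms (cs : List Char) (rows : List (List Char)) (hlen : rows.length = cs.length) :
    (List.range cs.length).map (fun i => cs.getD i ' ' :: rows.getD i [])
      = (cs.zip rows).map (fun p => p.1 :: p.2) := by
  apply List.ext_getElem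
  · simp [hlen]
  · intro i h1 h2
    simp only [List.length_map, List.length_range] at h1
    simp [List.getElem_zip, List.getElem?_eq_getElem h1, List.getElem?_eq_getElem (show i < rows.length by omega)]

-- B's foldl with the (rows, output) accumulator unrolls to A's recursion
theorem pvFoldEq (cs : List Char) :
    ∀ (l : List Nat) (rows : List (List Char)) (out : List (List String)),
      rows.length = cs.length → rows.Pairwise (· ≤ ·) →
      (l.foldl
        (fun (st : List (List Char) × List (List String)) _ =>
          let pre := (List.range cs.length).map (fun i => cs.getD i ' ' :: st.1.getD i [])
          let rows := (PySem.List.sorted (List.range cs.length) (fun i => cs.getD i ' ') false).map (fun j => pre.getD j [])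
          (rows, st.2 ++ [pre.map (fun r => String.ofList r), rows.map (fun r => String.ofList r)]))
        (rows, out)).2 = out ++ pvLoopA l.length cs rows := by
  intro l
  induction l with
  | nil => intro rows out _ _; simp [pvLoopA]
  | cons x t ih =>
    intro rows out hlen hs
    rw [List.foldl_cons, List.length_cons]
    show (t.foldl _ (_, _)).2 = _
    simp only [pvPreForms cs rows hlen]
    rw [← pvStepEq cs rows hlen hs]
    set pre := (cs.zip rows).map (fun p => p.1 :: p.2) with hpre
    set rows' := PySem.List.sorted pre (fun x => x) false with hrows'
    have hlen' : rows'.length = cs.length := by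
      rw [hrows', (PySem.List.sorted_perm pre (fun x => x) false).length_eq,
        hpre, List.length_map, List.length_zip, hlen, Nat.min_self]
    have hbridge : PySem.List.sorted pre (fun x => x) false
        = @PySem.List.sorted _ _ Preorder.toLT LinearOrder.toDecidableLT pre (fun x => x) false :=
      pvSortedCongrLT (fun a b => List.lt_iff_lex_lt a b) pre _
    have hs' : rows'.Pairwise (· ≤ ·) := by
      rw [hrows', hbridge]
      exact PySem.List.sorted_pairwise pre (fun x => x)
    rw [ih rows' (out ++ _) hlen' hs']
    show out ++ _ ++ _ = out ++ (_ :: _ :: pvLoopA t.length cs rows')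
    simp [hpre, hrows']

-- ===== VERDICT (by name: the statement is the Claim_ definition above) =====
theorem get_bwm_matrix_from_transform_spec : Claim_equal_get_bwm_matrix_from_transform := by
  intro bwt _
  unfold Spec_get_bwm_matrix_from_transform get_bwm_matrix_from_transform get_bwm_matrix_from_transform_alt
  have hrep : ∀ m : Nat, (List.replicate m ([] : List Char)).Pairwise (· ≤ ·) := by
    intro m
    induction m with
    | zero => simp
    | succ n ih => simp [List.replicate_succ, ih]
  have := pvFoldEq bwt.toList (List.range bwt.toList.length)
    (List.replicate bwt.toList.length []) [] (by simp) (hrep _)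
  simp only [List.length_range] at this
  exact (this).symm
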